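-- pv_equiv track=rewrite | github.com/christophstach/det-gan-research | test.py | calculate_chunk_sections
-- ===== SOURCE A (Python) =====
-- import math
--
-- def calculate_chunk_sections(latent_dim, n_blocks):
--     closest_power_of_two = 1
--     max_divisible = math.ceil(latent_dim / (n_blocks + 1))
--
--     while True:
--         if closest_power_of_two > max_divisible:
--             break
--         else:
--             closest_power_of_two *= 2
--
--     closest_power_of_two //= 2
--
--     sections = [closest_power_of_two for _ in range(n_blocks)]
--     sections.insert(0, latent_dim - (n_blocks * closest_power_of_two))
--
--     return sections
-- ===== SOURCE B (Python) =====
-- import math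
--
-- def calculate_chunk_sections(latent_dim, n_blocks):
--     max_divisible = math.ceil(latent_dim / (n_blocks + 1))
--     p = (1 << (max_divisible.bit_length() - 1)) if max_divisible >= 1 else 0
--     return [latent_dim - n_blocks * p] + [p] * n_blocks
-- ===== Notes on version B (the rewrite author's own statement) =====
-- stated objective: idiomatic
-- what changed: The iterative doubling search for the power of two is replaced by a closed-form bit_length computation, and the sections list is built by concatenation instead of insert(0, ...).
import Mathlib
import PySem

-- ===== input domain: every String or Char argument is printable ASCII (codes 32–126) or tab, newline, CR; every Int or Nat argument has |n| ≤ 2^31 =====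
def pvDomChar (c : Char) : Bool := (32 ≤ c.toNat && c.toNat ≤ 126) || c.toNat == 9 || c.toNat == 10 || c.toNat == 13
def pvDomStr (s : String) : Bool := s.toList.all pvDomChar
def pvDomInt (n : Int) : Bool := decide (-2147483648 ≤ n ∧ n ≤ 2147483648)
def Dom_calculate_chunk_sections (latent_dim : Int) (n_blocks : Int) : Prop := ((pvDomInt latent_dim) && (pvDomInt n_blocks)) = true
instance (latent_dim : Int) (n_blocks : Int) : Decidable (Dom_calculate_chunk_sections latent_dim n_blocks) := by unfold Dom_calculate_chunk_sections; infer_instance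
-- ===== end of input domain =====

-- B replaces A's doubling loop by a closed-form bit_length computation and builds the
-- result list by concatenation instead of insert (objective: idiomatic/simpler).

-- ===== PORT A =====
-- the `while True` doubling loop of A; cp starts at 1 and doubles while ≤ max_divisible
def pvA_loop (maxd : Int) (cp : Int) (h : 0 < cp) : Int :=
  if cp > maxd then cp else pvA_loop maxd (cp * 2) (by omega)
termination_by (maxd + 1 - cp).toNat
decreasing_by omega

def calculate_chunk_sections (latent_dim : Int) (n_blocks : Int) : List Int :=
  -- math.ceil(latent_dim / (n_blocks + 1)) = -((-latent_dim) // (n_blocks + 1)); exact on Dom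
  -- (|int| ≤ 2^31 keeps the float true-division's ceil equal to the exact ceil)
  let max_divisible := -(PySem.Int.floordiv (-latent_dim) (n_blocks + 1))
  let closest_power_of_two := PySem.Int.floordiv (pvA_loop max_divisible 1 one_pos) 2
  let sections := (List.range n_blocks.toNat).map (fun _ => closest_power_of_two)
  (latent_dim - n_blocks * closest_power_of_two) :: sections

-- ===== PORT B =====
def calculate_chunk_sections_alt (latent_dim : Int) (n_blocks : Int) : List Int :=
  let max_divisible := -(PySem.Int.floordiv (-latent_dim) (n_blocks + 1))
  let p := if 1 ≤ max_divisible then (1 : Int) <<< (PySem.Int.bitLength max_divisible - 1) else 0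
  [latent_dim - n_blocks * p] ++ List.replicate n_blocks.toNat p

-- ===== PRECONDITION & SPEC =====
-- Pre_ excludes only n_blocks = -1, where both Pythons raise ZeroDivisionError.
def Pre_calculate_chunk_sections (latent_dim : Int) (n_blocks : Int) : Prop := n_blocks ≠ -1
instance (latent_dim : Int) (n_blocks : Int) : Decidable (Pre_calculate_chunk_sections latent_dim n_blocks) := by unfold Pre_calculate_chunk_sections; infer_instance
def pvWitness_calculate_chunk_sections : Int × Int := (64, 3)
def Spec_calculate_chunk_sections (latent_dim : Int) (n_blocks : Int) (out : List Int) : Prop := out = calculate_chunk_sections_alt latent_dim n_blocks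
instance (latent_dim : Int) (n_blocks : Int) (out : List Int) : Decidable (Spec_calculate_chunk_sections latent_dim n_blocks out) := by unfold Spec_calculate_chunk_sections; infer_instance

-- ===== CLAIM (what is proved, stated in full; the proofs are below) =====
def Claim_equal_calculate_chunk_sections : Prop := ∀ (latent_dim : Int) (n_blocks : Int), Dom_calculate_chunk_sections latent_dim n_blocks → Pre_calculate_chunk_sections latent_dim n_blocks → Spec_calculate_chunk_sections latent_dim n_blocks (calculate_chunk_sections latent_dim n_blocks)

-- ===== LEMMAS AND PROOFS =====

-- 2^k ≤ maxd < 2^(k+1) determines bitLength maxd = k + 1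
lemma pv_bitLength_eq (maxd : Int) (k : Nat) (h1 : (2:Int)^k ≤ maxd) (h2 : maxd < 2^(k+1)) :
    PySem.Int.bitLength maxd = k + 1 := by
  have hpos : 0 < maxd := lt_of_lt_of_le (by positivity) h1
  have hne : maxd ≠ 0 := by omega
  have hlo := PySem.Int.two_pow_bitLength_le maxd hne
  have hhi := PySem.Int.lt_two_pow_bitLength maxd
  have hcast : (maxd.natAbs : Int) = maxd := Int.natAbs_of_nonneg (by omega)
  set B := PySem.Int.bitLength maxd with hB
  have h1' : 2^k ≤ maxd.natAbs := by
    rw [← hcast] at h1; exact_mod_cast h1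
  have h2' : maxd.natAbs < 2^(k+1) := by
    rw [← hcast] at h2; exact_mod_cast h2
  have hB1 : 1 ≤ B := by
    by_contra hc
    interval_cases B
    · simp at hhi; omega
  have hk1 : ¬ (B - 1 < k) := by
    intro hlt
    have : 2^B ≤ 2^k := Nat.pow_le_pow_right (by norm_num) (by omega)
    omega
  have hk2 : ¬ (k < B - 1) := by
    intro hlt
    have : 2^(k+1) ≤ 2^(B-1) := Nat.pow_le_pow_right (by norm_num) (by omega)
    omega
  omega

-- the loop from cp = 2^k with 2^k ≤ maxd returns 2^(bitLength maxd)
lemma pvA_loop_pow (maxd : Int) : ∀ (d k : Nat), PySem.Int.bitLength maxd - k ≤ d →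
    (2:Int)^k ≤ maxd → pvA_loop maxd ((2:Int)^k) (by positivity) = 2^(PySem.Int.bitLength maxd) := by
  intro d
  induction d with
  | zero =>
      intro k hd hk
      -- then bitLength maxd ≤ k, but 2^k ≤ maxd < 2^bitLength forces contradiction unless equality-ish
      exfalso
      have hpos : 0 < maxd := lt_of_lt_of_le (by positivity) hk
      have hhi := PySem.Int.lt_two_pow_bitLength maxd
      have hcast : (maxd.natAbs : Int) = maxd := Int.natAbs_of_nonneg (by omega)
      have h1' : 2^k ≤ maxd.natAbs := by
        rw [← hcast] at hk; exact_mod_cast hk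
      have : 2^(PySem.Int.bitLength maxd) ≤ 2^k := Nat.pow_le_pow_right (by norm_num) (by omega)
      omega
  | succ d ih =>
      intro k hd hk
      rw [pvA_loop]
      have hnot : ¬ ((2:Int)^k > maxd) := by omega
      rw [if_neg hnot]
      have hstep : (2:Int)^k * 2 = 2^(k+1) := by ring
      by_cases hnext : (2:Int)^(k+1) ≤ maxd
      · have hbl : k + 1 < PySem.Int.bitLength maxd := by
          have hpos : 0 < maxd := lt_of_lt_of_le (by positivity) hk
          have hhi := PySem.Int.lt_two_pow_bitLength maxd
          have hcast : (maxd.natAbs : Int) = maxd := Int.natAbs_of_nonneg (by omega)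
          have h1' : 2^(k+1) ≤ maxd.natAbs := by
            rw [← hcast] at hnext; exact_mod_cast hnext
          by_contra hc
          have : 2^(PySem.Int.bitLength maxd) ≤ 2^(k+1) := Nat.pow_le_pow_right (by norm_num) (by omega)
          omega
        have := ih (k+1) (by omega) hnext
        simpa [hstep] using this
      · -- loop ends on the next check: cp*2 = 2^(k+1) > maxd
        have hbl : PySem.Int.bitLength maxd = k + 1 := pv_bitLength_eq maxd k hk (by omega)
        rw [pvA_loop]
        rw [if_pos (by rw [hstep]; omega)]
        rw [hstep, hbl]

lemma pv_cp_eq (maxd : Int) :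
    PySem.Int.floordiv (pvA_loop maxd 1 one_pos) 2 =
      (if 1 ≤ maxd then (1 : Int) <<< (PySem.Int.bitLength maxd - 1) else 0) := by
  by_cases h : 1 ≤ maxd
  · rw [if_pos h]
    have h0 : pvA_loop maxd 1 one_pos = 2^(PySem.Int.bitLength maxd) := by
      have := pvA_loop_pow maxd (PySem.Int.bitLength maxd) 0 (by omega) (by simpa using h)
      simpa using this
    have hB1 : 1 ≤ PySem.Int.bitLength maxd := by
      have hhi := PySem.Int.lt_two_pow_bitLength maxd
      by_contra hc
      have : PySem.Int.bitLength maxd = 0 := by omega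
      rw [this] at hhi
      simp at hhi
      omega
    rw [h0, PySem.Int.floordiv_eq_ediv_of_pos (by norm_num)]
    rw [Int.shiftLeft_eq, one_mul]
    have : (2:Int)^(PySem.Int.bitLength maxd) = 2^(PySem.Int.bitLength maxd - 1) * 2 := by
      rw [← pow_succ]; congr 1; omega
    rw [this, Int.mul_ediv_cancel _ (by norm_num)]
  · rw [if_neg h]
    rw [pvA_loop, if_pos (by omega)]
    decide

-- ===== VERDICT (by name: the statement is the Claim_ definition above) =====
theorem calculate_chunk_sections_spec : Claim_equal_calculate_chunk_sections := by
  intro latent_dim n_blocks _ _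
  unfold Spec_calculate_chunk_sections calculate_chunk_sections calculate_chunk_sections_alt
  simp only [pv_cp_eq]
  congr 1
  simp [List.map_const']
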